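-- pv_equiv track=rewrite | github.com/acasadoalonso/SGP-2D-Live-Tracking-data-gathering | parserfuncs.py | gdatal
-- ===== SOURCE A (Python) =====
-- def gdatal(data, typer):               	        # get data on the left
--     p = data.find(typer)              	        # scan for the type requested
--     if p == -1:
--         return (" ")
--     pb = p
--     while (data[pb] != ' ' and data[pb] != '/' and pb >= 0):
--         pb -= 1
--     ret = data[pb +1:p]                  	# return the data requested
--     return(ret)
-- ===== SOURCE B (Python) =====
-- def gdatal(data, typer):
--     p = data.find(typer)
--     if p == -1:
--         return (" ")
--     token = []
--     for c in data[:p+1]: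
--         if c == ' ' or c == '/':
--             token = []
--         else:
--             token.append(c)
--     return ''.join(token[:-1])
-- ===== Notes on version B (the rewrite author's own statement) =====
-- stated objective: alternative
-- what changed: Replaced A's backward while-scan from the match position (which reads data[pb] before testing pb >= 0) by a single forward pass over data[:p+1] that accumulates the current token and resets it at each ' ' or '/'.
-- outside the precondition, e.g. on gdatal('', ''): A raises IndexError, B returns ''
import Mathlib
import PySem

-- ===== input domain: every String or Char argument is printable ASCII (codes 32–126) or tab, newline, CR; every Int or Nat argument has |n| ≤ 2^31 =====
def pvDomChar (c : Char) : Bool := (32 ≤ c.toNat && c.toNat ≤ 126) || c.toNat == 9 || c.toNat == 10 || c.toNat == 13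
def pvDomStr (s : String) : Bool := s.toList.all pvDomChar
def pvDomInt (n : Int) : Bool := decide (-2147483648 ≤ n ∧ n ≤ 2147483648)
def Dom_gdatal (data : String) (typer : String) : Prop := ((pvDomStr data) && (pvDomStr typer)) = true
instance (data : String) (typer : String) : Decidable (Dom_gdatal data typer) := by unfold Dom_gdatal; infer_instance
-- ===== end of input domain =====

-- B replaces A's backward while-scan (with its pb >= 0 check placed after the indexing) by a single
-- forward pass over data[:p+1] that rebuilds the current token and resets it at each delimiter
-- (objective: alternative; same cost, no negative-index wraparound).
-- ===== PORT A =====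
-- A's while loop: pb decreases from p; data[pb] is read BEFORE the pb >= 0 test (Python wraps pb = -1
-- to the last character), so the loop always stops at pb = -1; fuel p.toNat+2 covers every iteration.
def gdatalLoop (l : List Char) (pb : Int) (fuel : Nat) : Int :=
  match fuel with
  | 0 => pb
  | f + 1 =>
    match PySem.List.pyGet? l pb with
    | none => pb   -- Python raises IndexError here (only reachable for data = "", excluded by Pre_)
    | some c => if c ≠ ' ' ∧ c ≠ '/' ∧ 0 ≤ pb then gdatalLoop l (pb - 1) f else pb

def gdatal (data : String) (typer : String) : String :=
  let p := PySem.Str.find data typer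
  if p = -1 then " "
  else
    let pb := gdatalLoop data.toList p (p.toNat + 2)
    PySem.Str.slice data (some (pb + 1)) (some p)

-- ===== PORT B =====
def gdatal_alt (data : String) (typer : String) : String :=
  let p := PySem.Str.find data typer
  if p = -1 then " "
  else
    let token := (PySem.List.slice data.toList none (some (p + 1))).foldl
      (fun acc c => if c = ' ' ∨ c = '/' then [] else acc ++ [c]) []
    String.ofList (PySem.List.slice token none (some (-1)))

-- ===== PRECONDITION & SPEC =====
-- Pre_ excludes only (data = "", typer = ""): there A indexes data[0] of the empty string and raises
-- IndexError; every other input is admitted.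
def Pre_gdatal (data : String) (typer : String) : Prop := ¬ (data = "" ∧ typer = "")
instance (data : String) (typer : String) : Decidable (Pre_gdatal data typer) := by unfold Pre_gdatal; infer_instance
def pvWitness_gdatal : String × String := ("ab/cd X", "X")
def Spec_gdatal (data : String) (typer : String) (out : String) : Prop := out = gdatal_alt data typer
instance (data : String) (typer : String) (out : String) : Decidable (Spec_gdatal data typer out) := by unfold Spec_gdatal; infer_instance

-- ===== CLAIM (what is proved, stated in full; the proofs are below) =====
def Claim_equal_gdatal : Prop := ∀ (data : String) (typer : String), Dom_gdatal data typer → Pre_gdatal data typer → Spec_gdatal data typer (gdatal data typer)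

-- ===== LEMMAS AND PROOFS =====

-- B's folding step, named for the proofs
def gdatalTok (l : List Char) : List Char :=
  l.foldl (fun acc c => if c = ' ' ∨ c = '/' then [] else acc ++ [c]) []

-- joint characterisation of A's backward loop and B's forward fold on the prefix l.take m
lemma gdatalKey (l : List Char) (hne : l ≠ []) (m : Nat) (hm : m ≤ l.length) :
    ∀ fuel, m + 1 ≤ fuel →
      gdatalLoop l ((m : Int) - 1) fuel = (m : Int) - 1 - (gdatalTok (l.take m)).length
      ∧ gdatalTok (l.take m) = (l.take m).drop (m - (gdatalTok (l.take m)).length)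
      ∧ (gdatalTok (l.take m)).length ≤ m := by
  induction m with
  | zero =>
    intro fuel hf
    obtain ⟨f, rfl⟩ : ∃ f, fuel = f + 1 := ⟨fuel - 1, by omega⟩
    have hlast : PySem.List.pyGet? l (-1) = some (l.getLast hne) := by
      rw [PySem.List.pyGet?_neg_one, List.getLast?_eq_getLast_of_ne_nil hne]
    simp [gdatalLoop, hlast, gdatalTok]
  | succ m ih =>
    intro fuel hf
    obtain ⟨f, rfl⟩ : ∃ f, fuel = f + 1 := ⟨fuel - 1, by omega⟩
    have hlt : m < l.length := by omega
    have htake : l.take (m + 1) = l.take m ++ [l[m]] := List.take_succ_eq_append_getElem hlt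
    have hget : PySem.List.pyGet? l ((m : Int) + 1 - 1) = some l[m] := by
      have h : ((m : Int) + 1 - 1) = (m : Int) := by ring
      rw [h, PySem.List.pyGet?_natCast, List.getElem?_eq_getElem hlt]
    have htok : gdatalTok (l.take (m + 1))
        = if l[m] = ' ' ∨ l[m] = '/' then [] else gdatalTok (l.take m) ++ [l[m]] := by
      rw [gdatalTok, htake, List.foldl_append]
      rfl
    push_cast
    by_cases hd : l[m] = ' ' ∨ l[m] = '/'
    · have hnot : ¬ (l[m] ≠ ' ' ∧ l[m] ≠ '/' ∧ 0 ≤ (m : Int) + 1 - 1) := by tauto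
      have hloop : gdatalLoop l ((m : Int) + 1 - 1) (f + 1) = (m : Int) + 1 - 1 := by
        simp only [gdatalLoop, hget]
        rw [if_neg hnot]
      refine ⟨?_, ?_, ?_⟩
      · rw [hloop, htok, if_pos hd]; simp
      · rw [htok, if_pos hd]
        rw [eq_comm, List.drop_eq_nil_iff]
        simp
      · rw [htok, if_pos hd]; simp
    · rw [not_or] at hd
      have hcond : l[m] ≠ ' ' ∧ l[m] ≠ '/' ∧ 0 ≤ (m : Int) + 1 - 1 := ⟨hd.1, hd.2, by omega⟩
      have hloop : gdatalLoop l ((m : Int) + 1 - 1) (f + 1)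
          = gdatalLoop l ((m : Int) - 1) f := by
        simp only [gdatalLoop, hget, if_pos hcond]
        norm_num
      obtain ⟨ih1, ih2, ih3⟩ := ih (by omega) f (by omega)
      have hlen : (gdatalTok (l.take (m+1))).length = (gdatalTok (l.take m)).length + 1 := by
        rw [htok, if_neg (by tauto)]; simp
      refine ⟨?_, ?_, ?_⟩
      · rw [hloop, ih1, hlen]; push_cast; ring
      · rw [hlen, htok, if_neg (by tauto), htake]
        have hsub : m + 1 - ((gdatalTok (l.take m)).length + 1) = m - (gdatalTok (l.take m)).length := by omega
        rw [hsub, List.drop_append_of_le_length (by simp; omega)]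
        rw [← ih2]
      · rw [hlen]; omega

-- ===== VERDICT (by name: the statement is the Claim_ definition above) =====
theorem gdatal_spec : Claim_equal_gdatal := by
  unfold Claim_equal_gdatal Spec_gdatal
  intro data typer _ hpre
  unfold gdatal gdatal_alt
  rw [PySem.Str.find_eq]
  by_cases hp : PySem.Chars.find data.toList typer.toList = -1
  · simp [hp]
  · rw [if_neg hp, if_neg hp]
    set l : List Char := data.toList with hl
    set p : Int := PySem.Chars.find l typer.toList with hpdef
    have hp0 : 0 ≤ p := by
      have := PySem.Chars.neg_one_le_find l typer.toList
      omega
    have hlen : p.toNat < l.length := by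
      by_cases ht : typer.toList = []
      · have hfind0 : p = 0 := by rw [hpdef, ht, PySem.Chars.find_nil]
        have hdne : data ≠ "" := fun h => hpre ⟨h, String.toList_eq_nil_iff.mp ht⟩
        have : l ≠ [] := fun h => hdne (String.toList_eq_nil_iff.mp h)
        rw [hfind0]
        simp [List.length_pos_iff.mpr this]
      · have hspec := PySem.Chars.findFrom_natCast_spec l typer.toList 0 (by omega)
          (by simp only [Nat.cast_zero, PySem.Chars.findFrom_zero]; exact hp)
        simp only [Nat.cast_zero, PySem.Chars.findFrom_zero] at hspec
        rw [← hpdef] at hspec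
        obtain ⟨-, hpre2, -⟩ := hspec
        have hdrop : l.drop p.toNat ≠ [] := by
          intro h
          rw [h] at hpre2
          exact ht (List.prefix_nil.mp hpre2)
        have := List.length_drop (l := l) (i := p.toNat)
        have hld : 0 < l.length - p.toNat := by
          rcases Nat.lt_or_ge p.toNat l.length with h | h
          · omega
          · exfalso; exact hdrop (List.drop_eq_nil_iff.mpr h)
        omega
    have hne : l ≠ [] := by
      intro h
      rw [h] at hlen
      simp at hlen
    obtain ⟨h1, h2, h3⟩ := gdatalKey l hne (p.toNat + 1) (by omega) (p.toNat + 2) (by omega)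
    have hcast : (((p.toNat + 1 : Nat)) : Int) - 1 = p := by omega
    rw [hcast] at h1
    set tN : Nat := (gdatalTok (l.take (p.toNat + 1))).length with htN
    refine String.toList_inj.mp ?_
    have hslin : PySem.List.slice l none (some (p + 1)) = l.take (p.toNat + 1) := by
      rw [PySem.List.slice_to l (show (0:Int) ≤ p + 1 by omega)]
      congr 1
      omega
    have htokdef : List.foldl (fun acc c => if c = ' ' ∨ c = '/' then [] else acc ++ [c]) []
        (PySem.List.slice l none (some (p + 1))) = gdatalTok (l.take (p.toNat + 1)) := by
      rw [hslin, gdatalTok]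
    simp only [PySem.Str.toList_slice, PySem.Chars.slice_eq_listSlice, String.toList_ofList,
      htokdef, h1, PySem.List.slice_to_neg_one]
    set k : Nat := p.toNat + 1 - tN with hk
    have hknat : (p - (tN : Int) + 1).toNat = k := by omega
    rw [PySem.List.slice_toNat data.toList (show (0:Int) ≤ p - (tN:Int) + 1 by omega) (show (0:Int) ≤ p by omega), hknat]
    rw [List.dropLast_eq_take, ← htN, h2]
    rw [List.drop_take, List.take_take, ← hl]
    congr 1
    omega
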